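-- pv_equiv track=rewrite | github.com/charliejh/CSGORouletteSimulator | CSGO_Bet_Sim/__init__.py | notttrain
-- ===== SOURCE A (Python) =====
-- def notttrain(results) :
--     max = 0
--     count = 0
--     for i in results :
--         if i != "T" :
--             count += 1
--             if count > max :
--                 max = count
--         elif i == "T" :
--             count = 0
--     return max
-- ===== SOURCE B (Python) =====
-- def notttrain(results):
--     # Run-based scan: skip "T"s, measure each maximal non-"T" run, keep the best.
--     best = 0
--     i = 0
--     n = len(results)
--     while i < n:
--         if results[i] == "T":
--             i += 1
--         else:
--             j = i
--             while j < n and results[j] != "T":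
--                 j += 1
--             if j - i > best:
--                 best = j - i
--             i = j
--     return best
-- ===== Notes on version B (the rewrite author's own statement) =====
-- stated objective: alternative
-- what changed: B segments the list into maximal runs of non-"T" elements (outer skip loop + inner run-measuring loop) and keeps the longest run length, instead of A's single flat loop threading a running counter and running max.
import Mathlib
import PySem

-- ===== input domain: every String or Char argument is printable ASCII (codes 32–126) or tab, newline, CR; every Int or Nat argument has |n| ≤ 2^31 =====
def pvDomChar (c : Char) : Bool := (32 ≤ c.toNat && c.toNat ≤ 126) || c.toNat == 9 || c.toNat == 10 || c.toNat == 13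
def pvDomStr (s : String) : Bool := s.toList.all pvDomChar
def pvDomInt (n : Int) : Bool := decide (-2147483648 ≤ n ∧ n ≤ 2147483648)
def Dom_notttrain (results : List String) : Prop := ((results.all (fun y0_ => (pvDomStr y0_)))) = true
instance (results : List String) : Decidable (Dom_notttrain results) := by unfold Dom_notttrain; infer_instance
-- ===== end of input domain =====

-- B replaces A's flat loop (running counter + running max) by a run-based scan:
-- skip "T"s, measure each maximal non-"T" run, keep the longest; alternative decomposition, same cost.


-- ===== PORT A =====
-- A's loop: state (max, count); non-"T" bumps count and maybe max, "T" resets count.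
def notttrainStep (s : Int × Int) (i : String) : Int × Int :=
  if i ≠ "T" then
    let count := s.2 + 1
    (if count > s.1 then count else s.1, count)
  else (s.1, 0)

def notttrain (results : List String) : Int :=
  (results.foldl notttrainStep (0, 0)).1

-- ===== PORT B =====
-- B's outer while loop; the inner 'while j < n and results[j] != "T"' that measures a run
-- is the takeWhile/dropWhile pair over the remaining list.
def notttrainAltLoop (best : Int) : List String → Int
  | [] => best
  | x :: xs =>
    if x = "T" then notttrainAltLoop best xs
    else
      let run : Int := 1 + (xs.takeWhile (fun s => s ≠ "T")).length
      notttrainAltLoop (if run > best then run else best) (xs.dropWhile (fun s => s ≠ "T"))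
termination_by l => l.length
decreasing_by
  · simp
  · have := List.length_dropWhile_le (p := fun s => decide (s ≠ "T")) (l := xs)
    simpa using Nat.lt_succ_of_le this

def notttrain_alt (results : List String) : Int :=
  notttrainAltLoop 0 results

-- ===== PRECONDITION & SPEC =====
def Spec_notttrain (results : List String) (out : Int) : Prop := out = notttrain_alt results
instance (results : List String) (out : Int) : Decidable (Spec_notttrain results out) := by unfold Spec_notttrain; infer_instance

-- ===== CLAIM (what is proved, stated in full; the proofs are below) =====
def Claim_equal_notttrain : Prop := ∀ (results : List String), Dom_notttrain results → Spec_notttrain results (notttrain results)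

-- ===== LEMMAS AND PROOFS =====

-- Reference value: best run length given the current run already has length c.
def bestWith (c : Int) : List String → Int
  | [] => c
  | x :: xs => if x = "T" then max c (bestWith 0 xs) else bestWith (c + 1) xs

theorem bestWith_ge (l : List String) : ∀ c : Int, c ≤ bestWith c l := by
  induction l with
  | nil => intro c; simp [bestWith]
  | cons x xs ih =>
    intro c
    by_cases hx : x = "T"
    · simp [bestWith, hx]
    · simpa [bestWith, hx] using le_trans (by omega : c ≤ c + 1) (ih (c + 1))

theorem foldA_eq (l : List String) :
    ∀ m c : Int, 0 ≤ c → c ≤ m → (l.foldl notttrainStep (m, c)).1 = max m (bestWith c l) := by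
  induction l with
  | nil => intro m c _ h; simp [bestWith]; omega
  | cons x xs ih =>
    intro m c hc h
    by_cases hx : x = "T"
    · have hstep : notttrainStep (m, c) x = (m, 0) := by simp [notttrainStep, hx]
      have hbw : bestWith c (x :: xs) = max c (bestWith 0 xs) := by simp [bestWith, hx]
      rw [List.foldl_cons, hstep, ih m 0 le_rfl (by omega), hbw]
      have := bestWith_ge xs (0 : Int)
      omega
    · have hstep : notttrainStep (m, c) x
          = (if c + 1 > m then c + 1 else m, c + 1) := by
        simp [notttrainStep, hx]
      have hbw : bestWith c (x :: xs) = bestWith (c + 1) xs := by simp [bestWith, hx]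
      rw [List.foldl_cons, hstep, hbw]
      by_cases hcm : c + 1 > m
      · rw [if_pos hcm, ih (c + 1) (c + 1) (by omega) le_rfl]
        have := bestWith_ge xs (c + 1)
        omega
      · rw [if_neg hcm, ih m (c + 1) (by omega) (by omega)]

theorem bestWith_run (l : List String) :
    ∀ c : Int, 0 ≤ c → bestWith c l
      = max (c + ((l.takeWhile (fun s => s ≠ "T")).length : Int))
            (bestWith 0 (l.dropWhile (fun s => s ≠ "T"))) := by
  induction l with
  | nil => intro c hc; simp [bestWith]; omega
  | cons x xs ih =>
    intro c hc
    by_cases hx : x = "T"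
    · have := bestWith_ge xs (0 : Int)
      simp [bestWith, hx]
      omega
    · have hbw : bestWith c (x :: xs) = bestWith (c + 1) xs := by simp [bestWith, hx]
      rw [hbw, ih (c + 1) (by omega)]
      simp [hx]
      omega

theorem altLoop_eq (n : Nat) :
    ∀ l : List String, l.length ≤ n → ∀ best : Int, 0 ≤ best →
      notttrainAltLoop best l = max best (bestWith 0 l) := by
  induction n with
  | zero =>
    intro l hl best hb
    have : l = [] := List.eq_nil_of_length_eq_zero (Nat.le_zero.mp hl)
    subst this
    simp [notttrainAltLoop, bestWith]
    omega
  | succ n ih =>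
    intro l hl best hb
    match l with
    | [] => simp [notttrainAltLoop, bestWith]; omega
    | x :: xs =>
      by_cases hx : x = "T"
      · have hbw : bestWith 0 (x :: xs) = max 0 (bestWith 0 xs) := by simp [bestWith, hx]
        rw [show notttrainAltLoop best (x :: xs) = notttrainAltLoop best xs from by
              simp [notttrainAltLoop, hx],
            ih xs (by simpa using Nat.le_of_succ_le_succ hl) best hb, hbw]
        have := bestWith_ge xs (0 : Int)
        omega
      · have hdrop : (xs.dropWhile (fun s => s ≠ "T")).length ≤ n := by
          have h1 := List.length_dropWhile_le (p := fun s => decide (s ≠ "T")) (l := xs)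
          have h2 : xs.length ≤ n := by simpa using Nat.le_of_succ_le_succ hl
          exact le_trans h1 h2
        set run : Int := 1 + ((xs.takeWhile (fun s => s ≠ "T")).length : Int) with hrun
        have hstep : notttrainAltLoop best (x :: xs)
            = notttrainAltLoop (if run > best then run else best)
                (xs.dropWhile (fun s => s ≠ "T")) := by
          simp [notttrainAltLoop, hx, hrun]
        have hbw : bestWith 0 (x :: xs)
            = max run (bestWith 0 (xs.dropWhile (fun s => s ≠ "T"))) := by
          have h0 : bestWith 0 (x :: xs) = bestWith 1 xs := by simp [bestWith, hx]
          rw [h0, bestWith_run xs 1 (by omega)]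
        rw [hstep, ih _ hdrop _ (by split_ifs <;> omega), hbw]
        have := bestWith_ge (xs.dropWhile (fun s => s ≠ "T")) (0 : Int)
        split_ifs <;> omega

-- ===== VERDICT (by name: the statement is the Claim_ definition above) =====
theorem notttrain_spec : Claim_equal_notttrain := by
  intro results _
  show notttrain results = notttrain_alt results
  unfold notttrain notttrain_alt
  rw [foldA_eq results 0 0 le_rfl le_rfl,
      altLoop_eq results.length results le_rfl 0 le_rfl]
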